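-- pv_equiv track=rewrite | github.com/maccam912/Oddyssey | src/GameManager/algorithm/language.py | split_optional_structure
-- ===== SOURCE A (Python) =====
-- def split_optional_structure(structure):
--     structure_code = ''
--     if '?' in structure:
--         structure_1 = structure[:structure.index('?')] + structure[structure.index('?') + 1:]
--         structure_2 = structure[:structure.index('?')-1] + structure[structure.index('?') + 1:]
--         structure_code += split_optional_structure(structure_1)
--         structure_code += split_optional_structure(structure_2)
--     else:
--         structure_code += (structure + ',')
--     return structure_code
-- ===== SOURCE B (Python) =====
-- def split_optional_structure(structure):
--     stack = [structure]
--     pieces = []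
--     while stack:
--         s = stack.pop()
--         if '?' in s:
--             i = s.index('?')
--             stack.append(s[:i-1] + s[i+1:])  # drop-branch, expanded second
--             stack.append(s[:i] + s[i+1:])    # keep-branch, expanded first (DFS order)
--         else:
--             pieces.append(s + ',')
--     return ''.join(pieces)
-- ===== Notes on version B (the rewrite author's own statement) =====
-- stated objective: alternative
-- what changed: Replaces A's binary recursion (concatenating the results of two recursive calls) with an iterative explicit-stack DFS that accumulates finished variants in a list and joins them once.
import Mathlib
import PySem

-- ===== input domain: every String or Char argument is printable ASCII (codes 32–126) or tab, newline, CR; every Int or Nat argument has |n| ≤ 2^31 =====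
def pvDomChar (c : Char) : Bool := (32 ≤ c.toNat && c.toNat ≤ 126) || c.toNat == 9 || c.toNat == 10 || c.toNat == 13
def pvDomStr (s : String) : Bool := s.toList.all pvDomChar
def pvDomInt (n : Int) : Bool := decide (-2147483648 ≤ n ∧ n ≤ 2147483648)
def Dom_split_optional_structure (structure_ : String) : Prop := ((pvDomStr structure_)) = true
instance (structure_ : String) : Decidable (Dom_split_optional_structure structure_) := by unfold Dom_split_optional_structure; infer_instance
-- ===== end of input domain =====

-- B replaces A's binary recursion by an explicit-stack DFS loop with a result accumulator; return value unchanged.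

-- ===== PORT A =====
-- structure[:structure.index('?')] + structure[structure.index('?') + 1:]
def qSplit1 (l : List Char) : List Char :=
  PySem.List.slice l none (some (PySem.Chars.find l ['?'])) ++
    PySem.List.slice l (some (PySem.Chars.find l ['?'] + 1)) none

-- structure[:structure.index('?')-1] + structure[structure.index('?') + 1:]
def qSplit2 (l : List Char) : List Char :=
  PySem.List.slice l none (some (PySem.Chars.find l ['?'] - 1)) ++
    PySem.List.slice l (some (PySem.Chars.find l ['?'] + 1)) none

-- A's recursion, with fuel for totality; fuel length+1 is enough on every input in Pre_.
def goA : Nat → List Char → List Char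
  | 0, _ => []
  | n + 1, l =>
    if PySem.Chars.isIn ['?'] l then goA n (qSplit1 l) ++ goA n (qSplit2 l)
    else l ++ [',']

def split_optional_structure (structure_ : String) : String :=
  String.ofList (goA (structure_.toList.length + 1) structure_.toList)

-- ===== PORT B =====
-- B's while-loop over an explicit stack (head = top) and an accumulator; fuel counts pop-and-expand steps.
def goB : Nat → List (List Char) → List Char → List Char
  | _, [], acc => acc
  | n, l :: rest, acc =>
    if PySem.Chars.isIn ['?'] l then
      match n with
      | 0 => acc
      | m + 1 => goB m (qSplit1 l :: qSplit2 l :: rest) acc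
    else goB n rest (acc ++ (l ++ [',']))
  termination_by n st _ => (n, st.length)

def split_optional_structure_alt (structure_ : String) : String :=
  String.ofList (goB (2 ^ structure_.toList.length) [structure_.toList] [])

-- ===== PRECONDITION & SPEC =====
-- Pre_ excludes exactly the inputs on which A recurses forever (RecursionError in Python): those
-- containing a '?' at an index j with j ≤ 2·(number of '?' before j) and j ≤ len-2.
def Pre_split_optional_structure (structure_ : String) : Prop :=
  ∀ j < structure_.toList.length, structure_.toList[j]? = some '?' →
    j + 2 ≤ structure_.toList.length → 2 * ((structure_.toList.take j).count '?') < j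
instance (structure_ : String) : Decidable (Pre_split_optional_structure structure_) := by
  unfold Pre_split_optional_structure; infer_instance

def pvWitness_split_optional_structure : String := "a?b"

def Spec_split_optional_structure (structure_ : String) (out : String) : Prop :=
  out = split_optional_structure_alt structure_
instance (structure_ : String) (out : String) : Decidable (Spec_split_optional_structure structure_ out) := by
  unfold Spec_split_optional_structure; infer_instance

-- ===== CLAIM (what is proved, stated in full; the proofs are below) =====
def Claim_equal_split_optional_structure : Prop := ∀ (structure_ : String), Dom_split_optional_structure structure_ → Pre_split_optional_structure structure_ → Spec_split_optional_structure structure_ (split_optional_structure structure_)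

-- ===== LEMMAS AND PROOFS =====

-- list-level restatement of Pre_
def PreL (l : List Char) : Prop :=
  ∀ j < l.length, l[j]? = some '?' → j + 2 ≤ l.length → 2 * ((l.take j).count '?') < j

theorem pre_eq_preL (s : String) : Pre_split_optional_structure s ↔ PreL s.toList := Iff.rfl

-- splits form of PreL
theorem preL_iff (l : List Char) :
    PreL l ↔ ∀ P T : List Char, l = P ++ '?' :: T → T ≠ [] → 2 * (P.count '?') < P.length := by
  constructor
  · intro h P T hl hT
    subst hl
    have hT' : 0 < T.length := List.length_pos_iff.mpr hT
    have hget : (P ++ '?' :: T)[P.length]? = some '?' := by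
      rw [List.getElem?_append_right le_rfl]; simp
    have := h P.length (by simp) hget (by simp; omega)
    simpa [List.take_left] using this
  · intro h j hj hget hlen2
    have hj' : l[j]'hj = '?' := by
      have := List.getElem?_eq_getElem hj
      rw [this] at hget; exact Option.some.inj hget
    have hsplit : l = l.take j ++ '?' :: l.drop (j + 1) := by
      conv_lhs => rw [← List.take_append_drop j l]
      rw [← List.getElem_cons_drop hj, hj']
    have hne : l.drop (j + 1) ≠ [] := by
      intro hnil
      have := congrArg List.length hnil
      simp [List.length_drop] at this
      omega
    have := h (l.take j) (l.drop (j + 1)) hsplit hne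
    rwa [List.length_take, Nat.min_eq_left (le_of_lt hj)] at this

theorem isIn_q_true {l : List Char} (h : '?' ∈ l) : PySem.Chars.isIn ['?'] l = true := by
  rw [PySem.Chars.isIn_iff_infix]
  obtain ⟨s, t, rfl⟩ := List.append_of_mem h
  exact ⟨s, t, by simp⟩

theorem isIn_q_false {l : List Char} (h : ¬ '?' ∈ l) : PySem.Chars.isIn ['?'] l = false := by
  rw [PySem.Chars.isIn_eq_false_iff]
  exact fun hin => h (hin.sublist.subset (by simp))

-- the first '?' decomposes l, and find returns its index
theorem find_split {l : List Char} (hm : '?' ∈ l) :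
    ∃ P T : List Char, l = P ++ '?' :: T ∧ '?' ∉ P ∧
      PySem.Chars.find l ['?'] = (P.length : Int) := by
  have hinf : ['?'] <:+: l := by
    obtain ⟨s, t, rfl⟩ := List.append_of_mem hm
    exact ⟨s, t, by simp⟩
  have hnn : 0 ≤ PySem.Chars.find l ['?'] := (PySem.Chars.find_nonneg_iff l ['?']).mpr hinf
  obtain ⟨hpre, hmin⟩ := PySem.Chars.find_spec hnn
  set i : Nat := (PySem.Chars.find l ['?']).toNat with hi
  obtain ⟨t, ht⟩ := hpre
  simp only [List.singleton_append] at ht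
  have hilen : i < l.length := by
    by_contra hle
    rw [List.drop_eq_nil_of_le (by omega)] at ht
    simp at ht
  refine ⟨l.take i, l.drop (i + 1), ?_, ?_, ?_⟩
  · conv_lhs => rw [← List.take_append_drop i l]
    congr 1
    rw [← ht]
    congr 1
    have := congrArg (List.drop 1) ht
    simpa [List.drop_drop, Nat.add_comm] using this
  · intro hmem
    obtain ⟨k, hk, hget⟩ := List.mem_take_iff_getElem.mp hmem
    have hk1 : k < i := by omega
    have hk2 : k < l.length := by omega
    apply hmin k hk1
    refine ⟨l.drop (k + 1), ?_⟩
    rw [List.singleton_append]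
    rw [← List.getElem_cons_drop hk2]
    congr 1
    simpa using hget.symm
  · rw [List.length_take, Nat.min_eq_left (le_of_lt hilen)]
    exact (Int.toNat_of_nonneg hnn).symm

theorem qSplit1_eq {l P T : List Char} (h : l = P ++ '?' :: T)
    (hf : PySem.Chars.find l ['?'] = (P.length : Int)) : qSplit1 l = P ++ T := by
  unfold qSplit1
  rw [hf]
  have h1 : ((P.length : Int) + 1) = ((P.length + 1 : Nat) : Int) := by push_cast; ring
  rw [h1, PySem.List.slice_to_natCast, PySem.List.slice_from_natCast, h]
  congr 1
  · exact List.take_left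
  · simp [List.drop_append]

theorem qSplit2_eq_cons {l P T : List Char} (h : l = P ++ '?' :: T) (hP : P ≠ [])
    (hf : PySem.Chars.find l ['?'] = (P.length : Int)) : qSplit2 l = P.dropLast ++ T := by
  obtain ⟨P', c, rfl⟩ := (List.eq_nil_or_concat P).resolve_left hP
  simp only [List.concat_eq_append] at *
  unfold qSplit2
  rw [hf]
  have h1 : ((P' ++ [c]).length : Int) - 1 = ((P'.length : Nat) : Int) := by push_cast [List.length_append, List.length_cons, List.length_nil]; ring
  have h2 : ((P' ++ [c]).length : Int) + 1 = ((P'.length + 2 : Nat) : Int) := by push_cast [List.length_append, List.length_cons, List.length_nil]; ring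
  rw [h1, h2, PySem.List.slice_to_natCast, PySem.List.slice_from_natCast, h]
  congr 1
  · rw [List.dropLast_concat]
    rw [show P' ++ [c] ++ '?' :: T = P' ++ ([c] ++ '?' :: T) by simp]
    exact List.take_left
  · rw [show P' ++ [c] ++ '?' :: T = P' ++ ([c] ++ '?' :: T) by simp,
        show P'.length + 2 = P'.length + 2 by rfl]
    simp [List.drop_append]

-- the first '?' in P ++ T (with '?'-free P) decomposes T
theorem split_of_append_split {T R : List Char} :
    ∀ P : List Char, '?' ∉ P → ∀ Q : List Char, P ++ T = Q ++ '?' :: R →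
      ∃ T1, Q = P ++ T1 ∧ T = T1 ++ '?' :: R := by
  intro P
  induction P with
  | nil => exact fun _ Q h => ⟨Q, rfl, by simpa using h⟩
  | cons p P ih =>
    intro hP Q h
    cases Q with
    | nil =>
      simp at h
      exact absurd (by simp [h.1] : '?' ∈ p :: P) hP
    | cons q Q' =>
      simp at h
      obtain ⟨T1, h1, h2⟩ := ih (fun hm => hP (by simp [hm])) Q' h.2
      exact ⟨T1, by simp [h.1, h1], h2⟩

-- everything the two recursions need about one expansion step under PreL
theorem main_step {l : List Char} (hpre : PreL l) (hm : '?' ∈ l) :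
    ∃ P T : List Char, qSplit1 l = P ++ T ∧ qSplit2 l = P.dropLast ++ T ∧
      PreL (P ++ T) ∧ PreL (P.dropLast ++ T) ∧
      (P ++ T).length < l.length ∧ (P.dropLast ++ T).length < l.length := by
  obtain ⟨P, T, h, hP, hf⟩ := find_split hm
  have hPc : P.count '?' = 0 := List.count_eq_zero.mpr hP
  have hs1 : qSplit1 l = P ++ T := qSplit1_eq h hf
  by_cases hPnil : P = []
  · subst hPnil
    have hT : T = [] := by
      by_contra hTne
      have := (preL_iff l).mp hpre [] T h hTne
      simp at this
    subst hT
    subst h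
    refine ⟨[], [], by simpa using hs1, by decide, ?_, ?_, by simp, by simp⟩
    · intro j hj; simp at hj
    · intro j hj; simp at hj
  · have hs2 : qSplit2 l = P.dropLast ++ T := qSplit2_eq_cons h hPnil hf
    obtain ⟨P', c, hPc'⟩ := (List.eq_nil_or_concat P).resolve_left hPnil
    simp only [List.concat_eq_append] at hPc'
    have hc : c ≠ '?' := fun hc => hP (by simp [hPc', hc])
    have hP' : '?' ∉ P' := fun hmem => hP (by simp [hPc', hmem])
    refine ⟨P, T, hs1, hs2, ?_, ?_, ?_, ?_⟩
    · rw [preL_iff]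
      intro Q R hQR hR
      obtain ⟨T1, hQ, hT⟩ := split_of_append_split P hP Q hQR
      have hl2 : l = (P ++ '?' :: T1) ++ '?' :: R := by rw [h, hT]; simp
      have hbig := (preL_iff l).mp hpre _ _ hl2 hR
      subst hQ
      simp only [List.count_append, List.count_cons, List.length_append, List.length_cons,
        hPc, beq_self_eq_true, if_true] at hbig ⊢
      omega
    · rw [preL_iff]
      intro Q R hQR hT1
      rw [hPc', List.dropLast_concat] at hQR
      obtain ⟨T1, hQ, hT⟩ := split_of_append_split P' hP' Q hQR
      have hl2 : l = (P' ++ [c] ++ '?' :: T1) ++ '?' :: R := by rw [h, hT, hPc']; simp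
      have hbig := (preL_iff l).mp hpre _ _ hl2 hT1
      subst hQ
      have hPc2 : P'.count '?' = 0 := List.count_eq_zero.mpr hP'
      have hcb : (c == '?') = false := by simp [hc]
      simp only [List.count_append, List.count_cons, List.count_nil, List.length_append,
        List.length_cons, List.length_nil, hPc2, hcb, beq_self_eq_true, if_true] at hbig ⊢
      omega
    · rw [h]; simp
    · rw [h, hPc']; simp

theorem goB_cons_q {l : List Char} (hq : '?' ∈ l) (n : Nat) (rest : List (List Char))
    (acc : List Char) :
    goB (n + 1) (l :: rest) acc = goB n (qSplit1 l :: qSplit2 l :: rest) acc := by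
  rw [goB.eq_def]
  simp only [isIn_q_true hq, if_true]

theorem goB_cons_noq {l : List Char} (hq : ¬ '?' ∈ l) (n : Nat) (rest : List (List Char))
    (acc : List Char) :
    goB n (l :: rest) acc = goB n rest (acc ++ (l ++ [','])) := by
  rw [goB.eq_def]
  simp only [isIn_q_false hq, Bool.false_eq_true, if_false]

theorem goA_succ_q {l : List Char} (hq : '?' ∈ l) (n : Nat) :
    goA (n + 1) l = goA n (qSplit1 l) ++ goA n (qSplit2 l) := by
  simp only [goA, isIn_q_true hq, if_true]

theorem goA_succ_noq {l : List Char} (hq : ¬ '?' ∈ l) (n : Nat) :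
    goA (n + 1) l = l ++ [','] := by
  simp only [goA, isIn_q_false hq, Bool.false_eq_true, if_false]

theorem goA_congr : ∀ (N : Nat) (l : List Char), l.length ≤ N → PreL l →
    ∀ m n : Nat, l.length < m → l.length < n → goA m l = goA n l := by
  intro N
  induction N with
  | zero =>
    intro l hlen hpre m n hm hn
    have hnil : l = [] := List.eq_nil_of_length_eq_zero (by omega)
    subst hnil
    obtain ⟨m', rfl⟩ : ∃ m', m = m' + 1 := ⟨m - 1, by omega⟩
    obtain ⟨n', rfl⟩ : ∃ n', n = n' + 1 := ⟨n - 1, by omega⟩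
    rw [goA_succ_noq (by simp), goA_succ_noq (by simp)]
  | succ N ih =>
    intro l hlen hpre m n hm hn
    obtain ⟨m', rfl⟩ : ∃ m', m = m' + 1 := ⟨m - 1, by omega⟩
    obtain ⟨n', rfl⟩ : ∃ n', n = n' + 1 := ⟨n - 1, by omega⟩
    by_cases hq : '?' ∈ l
    · obtain ⟨P, T, hs1, hs2, hp1, hp2, hl1, hl2⟩ := main_step hpre hq
      rw [goA_succ_q hq, goA_succ_q hq, hs1, hs2]
      congr 1
      · exact ih (P ++ T) (by omega) hp1 m' n' (by omega) (by omega)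
      · exact ih (P.dropLast ++ T) (by omega) hp2 m' n' (by omega) (by omega)
    · rw [goA_succ_noq hq, goA_succ_noq hq]

theorem goB_run : ∀ (N : Nat) (l : List Char), l.length ≤ N → PreL l →
    ∀ (n : Nat) (rest : List (List Char)) (acc : List Char), 2 ^ l.length - 1 ≤ n →
      ∃ m : Nat, n - (2 ^ l.length - 1) ≤ m ∧ m ≤ n ∧
        goB n (l :: rest) acc = goB m rest (acc ++ goA (l.length + 1) l) := by
  intro N
  induction N with
  | zero =>
    intro l hlen hpre n rest acc hfuel
    have hnil : l = [] := List.eq_nil_of_length_eq_zero (by omega)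
    subst hnil
    refine ⟨n, by omega, le_rfl, ?_⟩
    rw [goB_cons_noq (by simp), goA_succ_noq (by simp)]
  | succ N ih =>
    intro l hlen hpre n rest acc hfuel
    by_cases hq : '?' ∈ l
    · have hlq : 1 ≤ l.length := List.length_pos_iff.mpr (fun hnil => by simp [hnil] at hq)
      obtain ⟨P, T, hs1, hs2, hp1, hp2, hl1, hl2⟩ := main_step hpre hq
      have ha1 : (1 : Nat) ≤ 2 ^ (l.length - 1) := Nat.one_le_two_pow
      have hq1 : 2 ^ (P ++ T).length ≤ 2 ^ (l.length - 1) :=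
        Nat.pow_le_pow_right (by norm_num) (by omega)
      have hq2 : 2 ^ (P.dropLast ++ T).length ≤ 2 ^ (l.length - 1) :=
        Nat.pow_le_pow_right (by norm_num) (by omega)
      have hq3 : (1 : Nat) ≤ 2 ^ (P ++ T).length := Nat.one_le_two_pow
      have hq4 : (1 : Nat) ≤ 2 ^ (P.dropLast ++ T).length := Nat.one_le_two_pow
      have h2l : 2 ^ l.length = 2 * 2 ^ (l.length - 1) := by
        conv_lhs => rw [show l.length = (l.length - 1) + 1 by omega]
        rw [pow_succ]
        ring
      obtain ⟨n', rfl⟩ : ∃ n', n = n' + 1 := ⟨n - 1, by omega⟩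
      obtain ⟨m1, hm1a, hm1b, he1⟩ := ih (P ++ T) (by omega) hp1 n'
        ((P.dropLast ++ T) :: rest) acc (by omega)
      obtain ⟨m2, hm2a, hm2b, he2⟩ := ih (P.dropLast ++ T) (by omega) hp2 m1 rest
        (acc ++ goA ((P ++ T).length + 1) (P ++ T)) (by omega)
      refine ⟨m2, by omega, by omega, ?_⟩
      rw [goB_cons_q hq, hs1, hs2, he1, he2]
      congr 1
      rw [List.append_assoc]
      congr 1
      rw [goA_succ_q hq, hs1, hs2]
      congr 1
      · exact goA_congr l.length (P ++ T) (by omega) hp1 _ _ (by omega) (by omega)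
      · exact goA_congr l.length (P.dropLast ++ T) (by omega) hp2 _ _ (by omega) (by omega)
    · refine ⟨n, by omega, le_rfl, ?_⟩
      rw [goB_cons_noq hq, goA_succ_noq hq]

-- ===== VERDICT (by name: the statement is the Claim_ definition above) =====
theorem split_optional_structure_spec : Claim_equal_split_optional_structure := by
  intro s _ hpre
  unfold Spec_split_optional_structure split_optional_structure split_optional_structure_alt
  obtain ⟨m, _, _, hrun⟩ := goB_run s.toList.length s.toList le_rfl ((pre_eq_preL s).mp hpre)
    (2 ^ s.toList.length) [] [] (by have := Nat.one_le_two_pow (n := s.toList.length); omega)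
  rw [hrun]
  simp [goB]
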